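-- pv_equiv track=rewrite | github.com/alexa24sa/Cryptography_blog | assets/practicas/Calculadora_v4/p_avanzado.py | generar_tabla_sumas
-- ===== SOURCE A (Python) =====
-- def inverso(n, p):
--     return pow(n, -1, p)
--
-- def sumar_puntos(P, Q, a, p):
--     """Siempre retorna (Punto_Resultante, Lambda). Si es infinito, retorna None en el respectivo campo."""
--     if P is None:  # P es punto infinito
--         return Q, None
--     if Q is None:  # Q es punto infinito
--         return P, None
--
--     x1, y1 = P
--     x2, y2 = Q
--
--     if x1 == x2 and y1 == y2:
--         return doblar_punto(P, a, p)
--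
--     if x1 == x2:  # Puntos opuestos resultan en infinito
--         return None, None
--
--     num = (y2 - y1) % p
--     den = (x2 - x1) % p
--
--     lam = (num * inverso(den, p)) % p
--
--     x3 = (lam**2 - x1 - x2) % p
--     y3 = (lam*(x1 - x3) - y1) % p
--
--     return (x3, y3), lam
--
-- def doblar_punto(P, a, p):
--     if P is None:
--         return None, None
--
--     x1, y1 = P
--
--     num = (3*(x1**2) + a) % p
--     den = (2*y1) % p
--
--     if den == 0: # Tangente vertical resulta en infinito
--         return None, None
--
--     lam = (num * inverso(den, p)) % p
--
--     x3 = (lam**2 - 2*x1) % p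
--     y3 = (lam*(x1 - x3) - y1) % p
--
--     return (x3, y3), lam
--
-- def punto_to_str(punto):
--     if punto is None:
--         return "∞"
--     return f"({punto[0]},{punto[1]})"
--
-- def generar_tabla_sumas(puntos, a, p):
--     tabla = []
--     header = [" "] + [punto_to_str(pt) for pt in puntos]
--     tabla.append(header)
--
--     for pi in puntos:
--         fila = [punto_to_str(pi)]
--         for pj in puntos:
--             punto_resultado, _ = sumar_puntos(pi, pj, a, p)
--             fila.append(punto_to_str(punto_resultado))
--         tabla.append(fila)
--
--     return tabla
-- ===== SOURCE B (Python) =====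
-- def generar_tabla_sumas(puntos, a, p):
--     # Point addition is commutative, so compute only the upper-triangular half
--     # (one unified chord/tangent addition per unordered pair) and reflect it.
--     def add(P, Q):
--         if P is None or Q is None:
--             return Q if P is None else P
--         x1, y1 = P
--         x2, y2 = Q
--         if x1 == x2:
--             if y1 != y2 or (2 * y1) % p == 0:
--                 return None
--             num, den = 3 * x1 * x1 + a, 2 * y1
--         else:
--             num, den = y2 - y1, x2 - x1
--         lam = num % p * pow(den % p, -1, p) % p
--         x3 = (lam * lam - x1 - x2) % p
--         y3 = (lam * (x1 - x3) - y1) % p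
--         return (x3, y3)
--
--     def fmt(pt):
--         return "∞" if pt is None else "({},{})".format(pt[0], pt[1])
--
--     n = len(puntos)
--     labels = [fmt(pt) for pt in puntos]
--     tri = [[add(puntos[i], puntos[j]) for j in range(i, n)] for i in range(n)]
--
--     def cell(i, j):
--         return tri[i][j - i] if i <= j else tri[j][i - j]
--
--     return [[" "] + labels] + [[labels[i]] + [fmt(cell(i, j)) for j in range(n)]
--                                for i in range(n)]
-- ===== Notes on version B (the rewrite author's own statement) =====
-- stated objective: alternative
-- what changed: B exploits commutativity of elliptic-curve point addition: it computes only the upper-triangular half of the table with a single unified chord/tangent addition routine (one call per unordered pair, no separate doblar_punto helper and no lambda bookkeeping) and renders each cell (i,j) by reflecting tri[min][max-min], instead of A's full double loop over all ordered pairs through sumar_puntos/doblar_punto.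
import Mathlib
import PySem

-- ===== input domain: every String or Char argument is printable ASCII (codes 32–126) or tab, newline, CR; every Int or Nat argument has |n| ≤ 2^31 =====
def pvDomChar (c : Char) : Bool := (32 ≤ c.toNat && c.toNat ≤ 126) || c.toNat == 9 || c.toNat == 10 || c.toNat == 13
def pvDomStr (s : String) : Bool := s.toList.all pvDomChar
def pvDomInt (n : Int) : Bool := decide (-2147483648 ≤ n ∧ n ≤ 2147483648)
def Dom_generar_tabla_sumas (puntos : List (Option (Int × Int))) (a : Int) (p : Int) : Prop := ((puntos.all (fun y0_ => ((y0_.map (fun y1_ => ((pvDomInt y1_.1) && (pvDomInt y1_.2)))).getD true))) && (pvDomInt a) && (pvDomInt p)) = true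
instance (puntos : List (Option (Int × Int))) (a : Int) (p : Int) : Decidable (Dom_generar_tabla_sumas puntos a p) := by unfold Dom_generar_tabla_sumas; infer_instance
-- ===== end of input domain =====

-- B computes only the upper triangle of the addition table (point addition is
-- commutative) with one unified chord/tangent addition routine, and reflects it
-- when rendering, instead of A's full double loop over separate add/double helpers.


-- ===== PORT A =====
-- pow(n, -1, p): modular inverse via Bézout coefficients, normalized with Python's %.
-- Exact wherever gcd(n, p) = 1 (Pre_ guarantees this); Python raises ValueError otherwise.
-- (shared by both ports: both Pythons call the built-in pow(·, -1, p))
def inverso (n p : Int) : Int := PySem.Int.mod (Int.gcdA n p) p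

def doblar_punto (P : Option (Int × Int)) (a p : Int) : Option (Int × Int) × Option Int :=
  match P with
  | none => (none, none)
  | some (x1, y1) =>
    let num := PySem.Int.mod (3 * x1 ^ 2 + a) p
    let den := PySem.Int.mod (2 * y1) p
    if den = 0 then (none, none)
    else
      let lam := PySem.Int.mod (num * inverso den p) p
      let x3 := PySem.Int.mod (lam ^ 2 - 2 * x1) p
      let y3 := PySem.Int.mod (lam * (x1 - x3) - y1) p
      (some (x3, y3), some lam)

def sumar_puntos (P Q : Option (Int × Int)) (a p : Int) : Option (Int × Int) × Option Int :=
  match P, Q with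
  | none, q => (q, none)
  | pp, none => (pp, none)
  | some (x1, y1), some (x2, y2) =>
    if x1 = x2 ∧ y1 = y2 then doblar_punto (some (x1, y1)) a p
    else if x1 = x2 then (none, none)
    else
      let num := PySem.Int.mod (y2 - y1) p
      let den := PySem.Int.mod (x2 - x1) p
      let lam := PySem.Int.mod (num * inverso den p) p
      let x3 := PySem.Int.mod (lam ^ 2 - x1 - x2) p
      let y3 := PySem.Int.mod (lam * (x1 - x3) - y1) p
      (some (x3, y3), some lam)

def punto_to_str (punto : Option (Int × Int)) : String :=
  match punto with
  | none => "∞"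
  | some pt => "(" ++ PySem.Int.toStr pt.1 ++ "," ++ PySem.Int.toStr pt.2 ++ ")"

def generar_tabla_sumas (puntos : List (Option (Int × Int))) (a : Int) (p : Int) : List (List String) :=
  let header := " " :: puntos.map (fun pt => punto_to_str pt)
  header :: puntos.map (fun pi =>
    punto_to_str pi :: puntos.map (fun pj => punto_to_str (sumar_puntos pi pj a p).1))

-- ===== PORT B =====
-- Source B's nested helper add(P, Q): one unified chord/tangent formula, returns the point only.
def pvAdd (a p : Int) (P Q : Option (Int × Int)) : Option (Int × Int) :=
  match P, Q with
  | none, q => q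
  | some pp, none => some pp
  | some (x1, y1), some (x2, y2) =>
    if x1 = x2 then
      if y1 ≠ y2 ∨ PySem.Int.mod (2 * y1) p = 0 then none
      else
        let num := 3 * x1 * x1 + a
        let den := 2 * y1
        let lam := PySem.Int.mod (PySem.Int.mod num p * inverso (PySem.Int.mod den p) p) p
        let x3 := PySem.Int.mod (lam * lam - x1 - x2) p
        let y3 := PySem.Int.mod (lam * (x1 - x3) - y1) p
        some (x3, y3)
    else
      let num := y2 - y1
      let den := x2 - x1
      let lam := PySem.Int.mod (PySem.Int.mod num p * inverso (PySem.Int.mod den p) p) p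
      let x3 := PySem.Int.mod (lam * lam - x1 - x2) p
      let y3 := PySem.Int.mod (lam * (x1 - x3) - y1) p
      some (x3, y3)

-- Source B's nested helper fmt(pt)
def pvFmt (pt : Option (Int × Int)) : String :=
  match pt with
  | none => "∞"
  | some q => "(" ++ PySem.Int.toStr q.1 ++ "," ++ PySem.Int.toStr q.2 ++ ")"

def generar_tabla_sumas_alt (puntos : List (Option (Int × Int))) (a : Int) (p : Int) : List (List String) :=
  let n := puntos.length
  let labels := puntos.map pvFmt
  -- tri = [[add(puntos[i], puntos[j]) for j in range(i, n)] for i in range(n)]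
  let tri := (List.range n).map (fun i =>
    (List.range' i (n - i)).map (fun j => pvAdd a p (puntos.getD i none) (puntos.getD j none)))
  -- cell(i, j) = tri[i][j-i] if i <= j else tri[j][i-j]  (indices provably in range, so getD is exact)
  let cell := fun (i j : Nat) =>
    if i ≤ j then (tri.getD i []).getD (j - i) none else (tri.getD j []).getD (i - j) none
  (" " :: labels) :: (List.range n).map (fun i =>
    labels.getD i " " :: (List.range n).map (fun j => pvFmt (cell i j)))

-- ===== PRECONDITION & SPEC =====
-- pairOK P Q p: the modular inversions A performs on the pair (P, Q) all succeed.
def pairOK (P Q : Option (Int × Int)) (p : Int) : Bool :=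
  match P, Q with
  | none, _ => true
  | some _, none => true
  | some (x1, y1), some (x2, y2) =>
    if x1 = x2 ∧ y1 = y2 then p ≠ 0 && (PySem.Int.mod (2 * y1) p == 0 || Int.gcd (2 * y1) p == 1)
    else if x1 = x2 then true
    else p ≠ 0 && Int.gcd (x2 - x1) p == 1

-- Pre_ excludes exactly the inputs where Python's pow(·, -1, p) (or % p with p = 0) raises.
def Pre_generar_tabla_sumas (puntos : List (Option (Int × Int))) (a : Int) (p : Int) : Prop :=
  ∀ P ∈ puntos, ∀ Q ∈ puntos, pairOK P Q p = true
instance (puntos : List (Option (Int × Int))) (a : Int) (p : Int) : Decidable (Pre_generar_tabla_sumas puntos a p) := by unfold Pre_generar_tabla_sumas; infer_instance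

def pvWitness_generar_tabla_sumas : (List (Option (Int × Int))) × Int × Int := ([some (1, 1), none, some (2, 3)], 1, 5)

def Spec_generar_tabla_sumas (puntos : List (Option (Int × Int))) (a : Int) (p : Int) (out : List (List String)) : Prop := out = generar_tabla_sumas_alt puntos a p
instance (puntos : List (Option (Int × Int))) (a : Int) (p : Int) (out : List (List String)) : Decidable (Spec_generar_tabla_sumas puntos a p out) := by unfold Spec_generar_tabla_sumas; infer_instance

-- ===== CLAIM (what is proved, stated in full; the proofs are below) =====
def Claim_equal_generar_tabla_sumas : Prop := ∀ (puntos : List (Option (Int × Int))) (a : Int) (p : Int), Dom_generar_tabla_sumas puntos a p → Pre_generar_tabla_sumas puntos a p → Spec_generar_tabla_sumas puntos a p (generar_tabla_sumas puntos a p)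

-- ===== LEMMAS AND PROOFS =====

theorem pv_mod_congr (a b p : Int) (h : a ≡ b [ZMOD p]) : PySem.Int.mod a p = PySem.Int.mod b p := by
  obtain ⟨k, hk⟩ := Int.ModEq.dvd h
  have hb : b = a + p * k := by linarith
  simp [PySem.Int.mod, hb, Int.add_mul_fmod_self_left]
theorem pv_mod_modeq (a p : Int) : PySem.Int.mod a p ≡ a [ZMOD p] := by
  have := Int.fmod_add_mul_fdiv a p
  exact Int.modEq_iff_dvd.mpr ⟨Int.fdiv a p, by simp [PySem.Int.mod]; linarith⟩
theorem inverso_spec (n p : Int) (h : Int.gcd n p = 1) : n * inverso n p ≡ 1 [ZMOD p] := by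
  have hb := Int.gcd_eq_gcd_ab n p
  rw [h] at hb
  have h1 : n * Int.gcdA n p ≡ 1 [ZMOD p] := by
    refine Int.modEq_iff_dvd.mpr ⟨Int.gcdB n p, ?_⟩
    push_cast at hb; linarith
  calc n * inverso n p ≡ n * Int.gcdA n p [ZMOD p] := (pv_mod_modeq _ p).mul_left n
    _ ≡ 1 [ZMOD p] := h1
theorem coprime_congr (x y p : Int) (h : x ≡ y [ZMOD p]) (hc : IsCoprime x p) : IsCoprime y p := by
  obtain ⟨k, hk⟩ := Int.ModEq.dvd h
  have : y = x + k * p := by linarith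
  rw [this]; exact hc.add_mul_right_left k

-- pvAdd computes exactly the first component of A's sumar_puntos (no hypotheses needed:
-- the Lean-side inverso is total, and the two side's formulas are ring-equal).
theorem pvAdd_eq_sumar_fst (P Q : Option (Int × Int)) (a p : Int) :
    pvAdd a p P Q = (sumar_puntos P Q a p).1 := by
  match P, Q with
  | none, none => rfl
  | none, some q => rfl
  | some q, none => rfl
  | some (x1, y1), some (x2, y2) =>
    by_cases hx : x1 = x2
    · subst hx
      by_cases hy : y1 = y2
      · subst hy
        by_cases hden : PySem.Int.mod (2 * y1) p = 0
        · simp [pvAdd, sumar_puntos, doblar_punto, hden]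
        · simp only [pvAdd, sumar_puntos, doblar_punto, hden, if_neg, if_true, and_self,
            if_pos, ne_eq, not_true_eq_false, false_or]
          have hnum : PySem.Int.mod (3 * x1 * x1 + a) p = PySem.Int.mod (3 * x1 ^ 2 + a) p := by
            congr 1; ring
          rw [hnum]
          set lam := PySem.Int.mod (PySem.Int.mod (3 * x1 ^ 2 + a) p * inverso (PySem.Int.mod (2 * y1) p) p) p
          have hx3 : PySem.Int.mod (lam * lam - x1 - x1) p = PySem.Int.mod (lam ^ 2 - 2 * x1) p := by
            congr 1; ring
          rw [hx3]
          simp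
      · have hy' : ¬ y2 = y1 := fun h => hy h.symm
        simp [pvAdd, sumar_puntos, hy]
    · have hx' : ¬ x2 = x1 := fun h => hx h.symm
      simp only [pvAdd, sumar_puntos, if_neg hx, if_neg (fun h : x1 = x2 ∧ y1 = y2 => hx h.1)]
      have hx3 : PySem.Int.mod
          ((PySem.Int.mod (PySem.Int.mod (y2 - y1) p * inverso (PySem.Int.mod (x2 - x1) p) p) p) *
            (PySem.Int.mod (PySem.Int.mod (y2 - y1) p * inverso (PySem.Int.mod (x2 - x1) p) p) p) - x1 - x2) p
          = PySem.Int.mod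
          ((PySem.Int.mod (PySem.Int.mod (y2 - y1) p * inverso (PySem.Int.mod (x2 - x1) p) p) p) ^ 2 - x1 - x2) p := by
        congr 1; ring
      rw [hx3]

-- core symmetry of the generic chord formulas
theorem chord_sym (x1 y1 x2 y2 p : Int) (hg : Int.gcd (x2 - x1) p = 1) :
    (PySem.Int.mod ((PySem.Int.mod (PySem.Int.mod (y2 - y1) p * inverso (PySem.Int.mod (x2 - x1) p) p) p) ^ 2 - x1 - x2) p,
     PySem.Int.mod ((PySem.Int.mod (PySem.Int.mod (y2 - y1) p * inverso (PySem.Int.mod (x2 - x1) p) p) p) * (x1 - (PySem.Int.mod ((PySem.Int.mod (PySem.Int.mod (y2 - y1) p * inverso (PySem.Int.mod (x2 - x1) p) p) p) ^ 2 - x1 - x2) p)) - y1) p)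
  = (PySem.Int.mod ((PySem.Int.mod (PySem.Int.mod (y1 - y2) p * inverso (PySem.Int.mod (x1 - x2) p) p) p) ^ 2 - x2 - x1) p,
     PySem.Int.mod ((PySem.Int.mod (PySem.Int.mod (y1 - y2) p * inverso (PySem.Int.mod (x1 - x2) p) p) p) * (x2 - (PySem.Int.mod ((PySem.Int.mod (PySem.Int.mod (y1 - y2) p * inverso (PySem.Int.mod (x1 - x2) p) p) p) ^ 2 - x2 - x1) p)) - y2) p) := by
  set d := x2 - x1 with hd
  set u := y2 - y1 with hu
  set den := PySem.Int.mod d p with hden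
  set den' := PySem.Int.mod (x1 - x2) p with hden'
  set inv := inverso den p with hinv
  set inv' := inverso den' p with hinv'
  have hcd : IsCoprime d p := Int.isCoprime_iff_gcd_eq_one.mpr hg
  have hcden : IsCoprime den p := coprime_congr d den p (pv_mod_modeq d p).symm hcd
  have hdden' : den' ≡ -d [ZMOD p] := by
    have h5 : -d = x1 - x2 := by omega
    rw [hden', h5]; exact pv_mod_modeq _ p
  have hcden' : IsCoprime den' p := coprime_congr (-d) den' p hdden'.symm hcd.neg_left
  have i1 : den * inv ≡ 1 [ZMOD p] := inverso_spec den p (Int.isCoprime_iff_gcd_eq_one.mp hcden)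
  have i2 : den' * inv' ≡ 1 [ZMOD p] := inverso_spec den' p (Int.isCoprime_iff_gcd_eq_one.mp hcden')
  have hdden : den ≡ d [ZMOD p] := pv_mod_modeq d p
  -- p ∣ inv + inv'
  have hsum : (p : Int) ∣ inv + inv' := by
    have hdi : den * inv' ≡ -1 [ZMOD p] := by
      calc den * inv' ≡ (-den') * inv' [ZMOD p] := Int.ModEq.mul_right inv' (by
              calc den ≡ d [ZMOD p] := hdden
                _ ≡ -den' [ZMOD p] := by simpa using hdden'.neg.symm)
        _ = -(den' * inv') := by ring
        _ ≡ -1 [ZMOD p] := i2.neg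
    have h0 : den * (inv + inv') ≡ 0 [ZMOD p] := by
      calc den * (inv + inv') = den * inv + den * inv' := by ring
        _ ≡ 1 + (-1) [ZMOD p] := i1.add hdi
        _ = 0 := by ring
    have hdvd : (p : Int) ∣ den * (inv + inv') := (Int.modEq_zero_iff_dvd).mp h0
    exact (hcden.symm).dvd_of_dvd_mul_left hdvd
  -- lambdas agree
  have hnum : PySem.Int.mod u p ≡ u [ZMOD p] := pv_mod_modeq u p
  have hnum' : PySem.Int.mod (y1 - y2) p ≡ -u [ZMOD p] := by
    have h3 : -u = y1 - y2 := by omega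
    rw [h3]; exact pv_mod_modeq _ p
  have hinveq : inv' ≡ -inv [ZMOD p] := by
    have := Int.modEq_zero_iff_dvd.mpr hsum
    calc inv' = (inv + inv') - inv := by ring
      _ ≡ 0 - inv [ZMOD p] := Int.ModEq.sub this (Int.ModEq.refl inv)
      _ = -inv := by ring
  have hlam : PySem.Int.mod (PySem.Int.mod u p * inv) p = PySem.Int.mod (PySem.Int.mod (y1 - y2) p * inv') p := by
    apply pv_mod_congr
    calc PySem.Int.mod u p * inv ≡ u * inv [ZMOD p] := Int.ModEq.mul_right inv hnum
      _ = (-u) * (-inv) := by ring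
      _ ≡ PySem.Int.mod (y1 - y2) p * inv' [ZMOD p] := Int.ModEq.mul hnum'.symm hinveq.symm
  set lam := PySem.Int.mod (PySem.Int.mod u p * inv) p with hlamdef
  rw [← hlam]
  -- x3 agree
  have hx3 : PySem.Int.mod (lam ^ 2 - x1 - x2) p = PySem.Int.mod (lam ^ 2 - x2 - x1) p := by
    have : lam ^ 2 - x1 - x2 = lam ^ 2 - x2 - x1 := by ring
    rw [this]
  rw [← hx3]
  set x3 := PySem.Int.mod (lam ^ 2 - x1 - x2) p with hx3def
  -- y3 agree
  have hlamu : lam * d ≡ u [ZMOD p] := by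
    calc lam * d ≡ (PySem.Int.mod u p * inv) * d [ZMOD p] := Int.ModEq.mul_right d (pv_mod_modeq _ p)
      _ ≡ (u * inv) * d [ZMOD p] := Int.ModEq.mul_right d (Int.ModEq.mul_right inv hnum)
      _ = u * (inv * d) := by ring
      _ ≡ u * (inv * den) [ZMOD p] := (Int.ModEq.mul_left inv hdden.symm).mul_left u
      _ = u * (den * inv) := by ring
      _ ≡ u * 1 [ZMOD p] := i1.mul_left u
      _ = u := by ring
  have hy3 : PySem.Int.mod (lam * (x1 - x3) - y1) p = PySem.Int.mod (lam * (x2 - x3) - y2) p := by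
    apply pv_mod_congr
    have : (lam * (x1 - x3) - y1) - (lam * (x2 - x3) - y2) = -(lam * d - u) := by
      rw [hd, hu]; ring
    have h4 : lam * (x1 - x3) - y1 = (lam * (x2 - x3) - y2) + (-(lam * d - u)) := by
      rw [hd, hu]; ring
    rw [h4]
    have : (-(lam * d - u)) ≡ 0 [ZMOD p] := by
      have := (Int.ModEq.sub hlamu (Int.ModEq.refl u))
      simpa using this.neg
    calc lam * (x2 - x3) - y2 + -(lam * d - u) ≡ (lam * (x2 - x3) - y2) + 0 [ZMOD p] := Int.ModEq.add (Int.ModEq.refl _) this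
      _ = lam * (x2 - x3) - y2 := by ring
  rw [hy3]

theorem sumar_fst_comm (P Q : Option (Int × Int)) (a p : Int) (h : pairOK P Q p = true) :
    (sumar_puntos P Q a p).1 = (sumar_puntos Q P a p).1 := by
  match P, Q with
  | none, none => rfl
  | none, some q => rfl
  | some q, none => rfl
  | some (x1, y1), some (x2, y2) =>
    by_cases heq : x1 = x2 ∧ y1 = y2
    · obtain ⟨h1, h2⟩ := heq
      subst h1; subst h2
      rfl
    · by_cases hx : x1 = x2
      · have hy : ¬ y1 = y2 := fun hy => heq ⟨hx, hy⟩
        have hy' : ¬ y2 = y1 := fun hh => hy hh.symm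
        simp [sumar_puntos, hx, hy, hy']
      · have hx' : ¬ x2 = x1 := fun hh => hx hh.symm
        have heq' : ¬ (x2 = x1 ∧ y2 = y1) := fun ⟨ha, _⟩ => hx' ha |>.elim
        have hg : Int.gcd (x2 - x1) p = 1 := by
          simp [pairOK, hx] at h
          exact h.2
        simp only [sumar_puntos, if_neg heq, if_neg hx, if_neg heq', if_neg hx']
        have := chord_sym x1 y1 x2 y2 p hg
        simp only [Prod.mk.injEq] at this ⊢
        exact congrArg some (Prod.ext this.1 this.2)

theorem pvFmt_eq (pt : Option (Int × Int)) : pvFmt pt = punto_to_str pt := by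
  cases pt <;> rfl

theorem tabla_eq_alt (puntos : List (Option (Int × Int))) (a p : Int)
    (hpre : ∀ P ∈ puntos, ∀ Q ∈ puntos, pairOK P Q p = true) :
    generar_tabla_sumas puntos a p = generar_tabla_sumas_alt puntos a p := by
  unfold generar_tabla_sumas generar_tabla_sumas_alt
  simp only []
  have hlabels : puntos.map pvFmt = puntos.map (fun pt => punto_to_str pt) :=
    List.map_congr_left (fun x _ => pvFmt_eq x)
  rw [hlabels]
  congr 1
  -- tri lookup lemma
  have tri_get : ∀ i j : Nat, i ≤ j → j < puntos.length →
      (((List.range puntos.length).map (fun i =>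
        (List.range' i (puntos.length - i)).map (fun j =>
          pvAdd a p (puntos.getD i none) (puntos.getD j none)))).getD i []).getD (j - i) none
      = pvAdd a p (puntos.getD i none) (puntos.getD j none) := by
    intro i j hij hj
    have hi : i < puntos.length := lt_of_le_of_lt hij hj
    have houter : ((List.range puntos.length).map (fun i =>
        (List.range' i (puntos.length - i)).map (fun j =>
          pvAdd a p (puntos.getD i none) (puntos.getD j none)))).getD i []
        = (List.range' i (puntos.length - i)).map (fun j =>
          pvAdd a p (puntos.getD i none) (puntos.getD j none)) := by
      rw [List.getD_eq_getElem _ _ (by simpa using hi), List.getElem_map, List.getElem_range]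
    rw [houter]
    rw [List.getD_eq_getElem _ _ (by simp; omega)]
    simp only [List.getElem_map, List.getElem_range']
    have hadd : i + 1 * (j - i) = j := by omega
    rw [hadd]
  apply List.ext_getElem
  · simp
  · intro i h1 h2
    simp only [List.getElem_map, List.getElem_range]
    have hi : i < puntos.length := by simpa using h2
    congr 1
    · rw [List.getD_eq_getElem _ _ (by simpa using hi), List.getElem_map]
    · apply List.ext_getElem
      · simp
      · intro j h3 h4
        have hj : j < puntos.length := by simpa using h4
        simp only [List.getElem_map, List.getElem_range]
        rw [pvFmt_eq]
        by_cases hij : i ≤ j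
        · rw [if_pos hij, tri_get i j hij hj]
          rw [pvAdd_eq_sumar_fst]
          rw [List.getD_eq_getElem puntos none hi, List.getD_eq_getElem puntos none hj]
        · rw [if_neg hij, tri_get j i (by omega) hi]
          rw [pvAdd_eq_sumar_fst]
          rw [List.getD_eq_getElem puntos none hi, List.getD_eq_getElem puntos none hj]
          congr 1
          exact sumar_fst_comm _ _ a p (hpre _ (List.getElem_mem hi) _ (List.getElem_mem hj))

-- ===== VERDICT (by name: the statement is the Claim_ definition above) =====
theorem generar_tabla_sumas_spec : Claim_equal_generar_tabla_sumas := by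
  intro puntos a p _ hpre
  unfold Spec_generar_tabla_sumas
  exact tabla_eq_alt puntos a p hpre
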